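-- pv_equiv track=rewrite | github.com/nskwak/python | 13_howManySameChar.py | searchDuplicate
-- ===== SOURCE A (Python) =====
-- def searchDuplicate(arrayA):
--     lenGth = len(arrayA)
--     result = []
--     rstDict = {}
--     for i in range(lenGth):
--         if arrayA[i] not in result:
--             result.append(arrayA[i])
--         else:
--             if arrayA[i] not in rstDict:
--                 tmp = {arrayA[i]: 2}
--                 rstDict.update(tmp)
--             else:
--                 rstDict[arrayA[i]] += 1
--     return result, rstDict
-- ===== SOURCE B (Python) =====
-- def searchDuplicate(arrayA):
--     seenCount = {}
--     order2 = []
--     for x in arrayA: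
--         c = seenCount.get(x, 0)
--         if c == 1:
--             order2.append(x)
--         seenCount[x] = c + 1
--     result = list(seenCount)
--     rstDict = {x: seenCount[x] for x in order2}
--     return result, rstDict
-- ===== Notes on version B (the rewrite author's own statement) =====
-- stated objective: faster
-- what changed: A builds the unique list by repeated list-membership scans and maintains the duplicate dict incrementally (insert 2 at the second occurrence, += 1 afterwards); B makes one counting pass over a running-count dict, records keys at their second occurrence, reads the unique list off the dict keys and fills the duplicate dict from the final counts.
import Mathlib
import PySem

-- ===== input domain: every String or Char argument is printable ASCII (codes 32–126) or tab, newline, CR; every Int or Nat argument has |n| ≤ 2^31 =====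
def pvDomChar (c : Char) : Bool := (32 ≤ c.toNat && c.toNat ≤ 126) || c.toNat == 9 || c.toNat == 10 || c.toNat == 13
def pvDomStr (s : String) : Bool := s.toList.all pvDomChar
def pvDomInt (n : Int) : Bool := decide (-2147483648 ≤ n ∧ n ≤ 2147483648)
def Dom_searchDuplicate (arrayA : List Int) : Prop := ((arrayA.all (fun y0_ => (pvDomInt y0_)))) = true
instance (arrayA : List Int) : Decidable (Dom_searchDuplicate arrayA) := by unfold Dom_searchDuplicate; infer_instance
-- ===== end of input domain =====

-- B replaces A's interleaved membership-scan loop (list membership + insert-2/increment dict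
-- maintenance) by one counting pass over a running-count dict that records second occurrences,
-- reading the unique list off the dict keys; objective: faster (hashing removes the list scans).

-- ===== PORT A =====
-- Python iterates `for i in range(len(arrayA))` reading arrayA[i]; ported as a fold over the
-- elements in order (same values, same branch order). `rstDict[x] += 1` is executed only with
-- x present, so it is Dict.modify x 0 (· + 1) exactly.
def searchDuplicate (arrayA : List Int) : List Int × (List (Int × Int)) :=
  let st := arrayA.foldl
    (fun (st : List Int × PySem.Dict Int Int) x =>
      if x ∉ st.1 then (st.1 ++ [x], st.2)
      else if st.2.contains x = false then (st.1, st.2.insert x 2)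
      else (st.1, st.2.modify x 0 (· + 1)))
    ([], PySem.Dict.empty)
  (st.1, st.2.items)

-- ===== PORT B =====
-- Source B: one pass keeps seenCount (a running counter) and order2 (keys at their second
-- occurrence); result = list(seenCount) is the keys in first-occurrence order; the final dict
-- maps each key of order2 to seenCount[x] (x is a key of seenCount, so the lookup is getD).
def searchDuplicate_alt (arrayA : List Int) : List Int × (List (Int × Int)) :=
  let st := arrayA.foldl
    (fun (st : PySem.Dict Int Int × List Int) x =>
      let c := st.1.getD x 0
      (st.1.insert x (c + 1), if c == 1 then st.2 ++ [x] else st.2))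
    (PySem.Dict.empty, [])
  let result := st.1.keys
  let rstDict := st.2.foldl
    (fun (d : PySem.Dict Int Int) x => d.insert x (st.1.getD x 0)) PySem.Dict.empty
  (result, rstDict.items)

-- ===== PRECONDITION & SPEC =====
def Spec_searchDuplicate (arrayA : List Int) (out : List Int × (List (Int × Int))) : Prop := out = searchDuplicate_alt arrayA
instance (arrayA : List Int) (out : List Int × (List (Int × Int))) : Decidable (Spec_searchDuplicate arrayA out) := by unfold Spec_searchDuplicate; infer_instance

-- ===== CLAIM (what is proved, stated in full; the proofs are below) =====
def Claim_equal_searchDuplicate : Prop := ∀ (arrayA : List Int), Dom_searchDuplicate arrayA → Spec_searchDuplicate arrayA (searchDuplicate arrayA)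

-- ===== LEMMAS AND PROOFS =====

-- the shared "unique list" loop
def pvUniq (p : List Int) : List Int :=
  p.foldl (fun r x => if x ∉ r then r ++ [x] else r) []

-- second-occurrence keys of a list, given the multiset `seen` already processed
def pvSk (seen : List Int) : List Int → List Int
  | [] => []
  | x :: xs => if seen.count x = 1 then x :: pvSk (x :: seen) xs else pvSk (x :: seen) xs

-- the items list both dicts end up with: keys in second-occurrence order of p, values counted in cnt
def pvDm (cnt p : List Int) : List (Int × Int) :=
  (pvSk [] p).map (fun a => (a, (cnt.count a : Int)))

lemma pvUniq_mem_aux (x : Int) : ∀ (p r : List Int),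
    x ∈ p.foldl (fun r x => if x ∉ r then r ++ [x] else r) r ↔ x ∈ r ∨ x ∈ p := by
  intro p
  induction p with
  | nil => simp
  | cons y ys ih =>
    intro r
    rw [List.foldl_cons]
    by_cases h : y ∈ r
    · rw [if_neg (not_not_intro h), ih]
      simp only [List.mem_cons]
      constructor
      · rintro (h1 | h2)
        · exact Or.inl h1
        · exact Or.inr (Or.inr h2)
      · rintro (h1 | h1 | h2)
        · exact Or.inl h1
        · exact Or.inl (h1 ▸ h)
        · exact Or.inr h2
    · rw [if_pos h, ih]
      simp only [List.mem_append, List.mem_cons]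
      constructor
      · rintro (h1 | h1)
        · rcases h1 with h1 | h1
          · exact Or.inl h1
          · exact Or.inr (Or.inl (by simpa using h1))
        · exact Or.inr (Or.inr h1)
      · rintro (h1 | h1 | h2)
        · exact Or.inl (Or.inl h1)
        · exact Or.inl (Or.inr (by simpa using h1))
        · exact Or.inr h2

lemma pvUniq_mem (x : Int) (p : List Int) : x ∈ pvUniq p ↔ x ∈ p := by
  unfold pvUniq
  rw [pvUniq_mem_aux x p []]
  simp

lemma pvUniq_append (p : List Int) (x : Int) :
    pvUniq (p ++ [x]) = if x ∉ pvUniq p then pvUniq p ++ [x] else pvUniq p := by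
  simp [pvUniq, List.foldl_append]

lemma pvSk_append (x : Int) : ∀ (l seen : List Int),
    pvSk seen (l ++ [x]) = pvSk seen l ++ (if seen.count x + l.count x = 1 then [x] else []) := by
  intro l
  induction l with
  | nil => intro seen; simp [pvSk]
  | cons y ys ih =>
    intro seen
    have hc : ((y :: seen).count x + ys.count x = 1) ↔ (seen.count x + (y :: ys).count x = 1) := by
      simp only [List.count_cons, beq_iff_eq]
      omega
    simp only [List.cons_append, pvSk, ih (y :: seen)]
    rw [if_congr hc rfl rfl]
    by_cases hy : seen.count y = 1
    · simp [hy]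
    · simp [hy]

lemma pvSk_mem (a : Int) : ∀ (l seen : List Int),
    a ∈ pvSk seen l ↔ seen.count a ≤ 1 ∧ 2 ≤ seen.count a + l.count a := by
  intro l
  induction l with
  | nil => intro seen; simp [pvSk]
  | cons y ys ih =>
    intro seen
    by_cases hy : seen.count y = 1 <;>
      by_cases hay : a = y
    · subst hay
      simp only [pvSk, if_pos hy, List.mem_cons, ih (a :: seen), List.count_cons, beq_iff_eq]
      simp [hy]
      omega
    · have hya : ¬ (y = a) := fun h => hay h.symm
      simp only [pvSk, if_pos hy, List.mem_cons, ih (y :: seen), List.count_cons, beq_iff_eq]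
      simp [hay, hya]
    · subst hay
      simp only [pvSk, if_neg hy, ih (a :: seen), List.count_cons, beq_iff_eq]
      simp
      omega
    · have hya : ¬ (y = a) := fun h => hay h.symm
      simp only [pvSk, if_neg hy, ih (y :: seen), List.count_cons, beq_iff_eq]
      simp [hya]

lemma pvSk_nodup : ∀ (l seen : List Int), (pvSk seen l).Nodup := by
  intro l
  induction l with
  | nil => intro seen; simp [pvSk]
  | cons y ys ih =>
    intro seen
    by_cases hy : seen.count y = 1
    · simp only [pvSk, if_pos hy]
      refine List.Nodup.cons ?_ (ih _)
      intro hmem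
      have := (pvSk_mem y ys (y :: seen)).mp hmem
      simp [hy] at this
    · simpa [pvSk, hy] using ih (y :: seen)

-- one step of A's loop, against the abstract description
lemma pvStepA (p : List Int) (x : Int) :
    (if x ∉ pvUniq p then (pvUniq p ++ [x], PySem.Dict.mk (pvDm p p))
     else if (PySem.Dict.mk (pvDm p p)).contains x = false
       then (pvUniq p, (PySem.Dict.mk (pvDm p p)).insert x 2)
       else (pvUniq p, (PySem.Dict.mk (pvDm p p)).modify x 0 (· + 1)))
      = (pvUniq (p ++ [x]), PySem.Dict.mk (pvDm (p ++ [x]) (p ++ [x]))) := by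
  have hmemsk : ∀ a, a ∈ pvSk [] p ↔ 2 ≤ p.count a := by
    intro a; simpa using pvSk_mem a p []
  have hkeys : (PySem.Dict.mk (pvDm p p)).keys = pvSk [] p := by
    simp [PySem.Dict.keys_mk, pvDm, List.map_map, Function.comp_def]
  have hcontains : (PySem.Dict.mk (pvDm p p)).contains x = decide (x ∈ pvSk [] p) := by
    rw [PySem.Dict.contains_eq_decide_mem_keys, hkeys]
  by_cases hxp : x ∈ p
  · have hxu : x ∈ pvUniq p := (pvUniq_mem x p).mpr hxp
    rw [if_neg (not_not_intro hxu), pvUniq_append, if_neg (not_not_intro hxu)]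
    by_cases h2 : 2 ≤ p.count x
    · -- third branch: x already in the dict, increment
      have hx_sk : x ∈ pvSk [] p := (hmemsk x).mpr h2
      have hc : (PySem.Dict.mk (pvDm p p)).contains x = true := by
        rw [hcontains]; simp [hx_sk]
      rw [if_neg (by simp [hc])]
      refine Prod.ext rfl ?_
      have hnd : (PySem.Dict.mk (pvDm p p)).keys.Nodup := by
        rw [hkeys]; exact pvSk_nodup p []
      have hmm : (x, (p.count x : Int)) ∈ (PySem.Dict.mk (pvDm p p)).items :=
        List.mem_map.mpr ⟨x, hx_sk, rfl⟩
      have hgd : (PySem.Dict.mk (pvDm p p)).getD x 0 = (p.count x : Int) := by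
        exact PySem.Dict.getD_of_mem_items _ hmm hnd 0
      have hmod : (PySem.Dict.mk (pvDm p p)).modify x 0 (· + 1)
          = (PySem.Dict.mk (pvDm p p)).insert x ((p.count x : Int) + 1) := by
        show (PySem.Dict.mk (pvDm p p)).insert x ((PySem.Dict.mk (pvDm p p)).getD x 0 + 1) = _
        rw [hgd]
      rw [hmod]
      dsimp only
      apply PySem.Dict.ext
      rw [PySem.Dict.items_insert_of_contains _ _ hc]
      have hsk : pvSk [] (p ++ [x]) = pvSk [] p := by
        rw [pvSk_append]; simp; omega
      show (pvDm p p).map (fun q => if q.1 == x then (x, (p.count x : Int) + 1) else q)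
          = pvDm (p ++ [x]) (p ++ [x])
      simp only [pvDm, hsk, List.map_map]
      apply List.map_congr_left
      intro a ha
      by_cases hax : a = x
      · subst hax
        simp [List.count_append]
      · have hxa : ¬ (x = a) := fun h => hax h.symm
        have hca : (p ++ [x]).count a = p.count a := by
          simp [List.count_append, hxa]
        simp [hax, hca]
    · -- second branch: p.count x = 1, fresh dict key, insert value 2
      have hcnt1 : 1 ≤ p.count x := List.one_le_count_iff.mpr hxp
      have hcx : p.count x = 1 := by omega
      have hx_sk : x ∉ pvSk [] p := fun h => by
        have := (hmemsk x).mp h; omega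
      have hc : (PySem.Dict.mk (pvDm p p)).contains x = false := by
        rw [hcontains]; simp [hx_sk]
      rw [if_pos hc]
      refine Prod.ext rfl ?_
      dsimp only
      apply PySem.Dict.ext
      rw [PySem.Dict.items_insert_of_not_contains _ _ hc]
      have hsk : pvSk [] (p ++ [x]) = pvSk [] p ++ [x] := by
        rw [pvSk_append]; simp [hcx]
      show pvDm p p ++ [(x, 2)] = pvDm (p ++ [x]) (p ++ [x])
      simp only [pvDm, hsk, List.map_append, List.map_cons, List.map_nil]
      congr 1
      · apply List.map_congr_left
        intro a ha
        have h2a : 2 ≤ p.count a := (hmemsk a).mp ha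
        have hxa : ¬ (x = a) := fun h => by subst h; omega
        simp [List.count_append, hxa]
      · simp [List.count_append, hcx]
  · -- first branch: new element, dict untouched
    have hxu : x ∉ pvUniq p := fun h => hxp ((pvUniq_mem x p).mp h)
    have hcx : p.count x = 0 := List.count_eq_zero.mpr hxp
    rw [if_pos hxu, pvUniq_append, if_pos hxu]
    refine Prod.ext rfl ?_
    have hsk : pvSk [] (p ++ [x]) = pvSk [] p := by
      rw [pvSk_append]; simp [hcx]
    dsimp only
    apply PySem.Dict.ext
    show pvDm p p = pvDm (p ++ [x]) (p ++ [x])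
    simp only [pvDm, hsk]
    apply List.map_congr_left
    intro a ha
    have h2a : 2 ≤ p.count a := (hmemsk a).mp ha
    have hxa : ¬ (x = a) := fun h => by subst h; omega
    simp [List.count_append, hxa]

-- A's whole loop, by the one-step lemma
lemma pvFoldA : ∀ (l p : List Int),
    l.foldl (fun (st : List Int × PySem.Dict Int Int) x =>
      if x ∉ st.1 then (st.1 ++ [x], st.2)
      else if st.2.contains x = false then (st.1, st.2.insert x 2)
      else (st.1, st.2.modify x 0 (· + 1)))
      (pvUniq p, PySem.Dict.mk (pvDm p p))
    = (pvUniq (p ++ l), PySem.Dict.mk (pvDm (p ++ l) (p ++ l))) := by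
  intro l
  induction l with
  | nil => intro p; simp
  | cons x xs ih =>
    intro p
    rw [List.foldl_cons]
    dsimp only
    rw [pvStepA p x, ih (p ++ [x])]
    simp

-- the unique-list loop of A is PySem.Set.ofList (same fold, branches flipped)
lemma pvUniq_eq_ofList (p : List Int) : pvUniq p = PySem.Set.ofList p := by
  suffices h : ∀ r : List Int,
      p.foldl (fun r x => if x ∉ r then r ++ [x] else r) r = p.foldl PySem.Set.add r by
    exact h []
  induction p with
  | nil => intro r; rfl
  | cons y ys ih =>
    intro r
    rw [List.foldl_cons, List.foldl_cons]
    have hstep : (if y ∉ r then r ++ [y] else r) = PySem.Set.add r y := by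
      by_cases h : y ∈ r <;> simp [PySem.Set.add, h]
    rw [hstep, ih]

-- B's counting loop: the dict is the running counter, the list the second-occurrence keys
lemma pvFoldB : ∀ (l p : List Int),
    l.foldl (fun (st : PySem.Dict Int Int × List Int) x =>
        let c := st.1.getD x 0
        (st.1.insert x (c + 1), if c == 1 then st.2 ++ [x] else st.2))
      (PySem.Dict.counter p, pvSk [] p)
    = (PySem.Dict.counter (p ++ l), pvSk [] (p ++ l)) := by
  intro l
  induction l with
  | nil => intro p; simp
  | cons x xs ih =>
    intro p
    rw [List.foldl_cons]
    show xs.foldl _ ((PySem.Dict.counter p).insert x ((PySem.Dict.counter p).getD x 0 + 1),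
        if (PySem.Dict.counter p).getD x 0 == 1 then pvSk [] p ++ [x] else pvSk [] p) = _
    have h1 : (PySem.Dict.counter p).insert x ((PySem.Dict.counter p).getD x 0 + 1)
        = PySem.Dict.counter (p ++ [x]) := by
      rw [PySem.Dict.counter_append_singleton]
      rfl
    have h2 : (if (PySem.Dict.counter p).getD x 0 == 1 then pvSk [] p ++ [x] else pvSk [] p)
        = pvSk [] (p ++ [x]) := by
      rw [PySem.Dict.getD_counter, pvSk_append]
      by_cases hcx : p.count x = 1 <;> simp [hcx]
    rw [h1, h2, ih (p ++ [x])]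
    simp

-- ===== VERDICT (by name: the statement is the Claim_ definition above) =====
theorem searchDuplicate_spec : Claim_equal_searchDuplicate := by
  intro arrayA _
  show searchDuplicate arrayA = searchDuplicate_alt arrayA
  have hA : searchDuplicate arrayA
      = (pvUniq arrayA, (PySem.Dict.mk (pvDm arrayA arrayA)).items) := by
    show ((arrayA.foldl _ ([], PySem.Dict.empty)).1, (arrayA.foldl _ ([], PySem.Dict.empty)).2.items) = _
    have h0 : (([], PySem.Dict.empty) : List Int × PySem.Dict Int Int)
        = (pvUniq [], PySem.Dict.mk (pvDm [] [])) := rfl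
    rw [h0, pvFoldA arrayA []]
    simp
  have hB : searchDuplicate_alt arrayA
      = (pvUniq arrayA, (PySem.Dict.mk (pvDm arrayA arrayA)).items) := by
    show ((arrayA.foldl _ (PySem.Dict.empty, [])).1.keys,
        ((arrayA.foldl _ (PySem.Dict.empty, [])).2.foldl _ PySem.Dict.empty).items) = _
    have h0 : ((PySem.Dict.empty, []) : PySem.Dict Int Int × List Int)
        = (PySem.Dict.counter [], pvSk [] []) := rfl
    rw [h0, pvFoldB arrayA []]
    have hkeys : (PySem.Dict.counter ([] ++ arrayA)).keys = pvUniq arrayA := by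
      rw [PySem.Dict.keys_counter, pvUniq_eq_ofList]
      simp
    have hsknd : (pvSk [] ([] ++ arrayA)).Nodup := pvSk_nodup _ _
    have hitems : ((pvSk [] ([] ++ arrayA)).foldl
        (fun (d : PySem.Dict Int Int) x =>
          d.insert x ((PySem.Dict.counter ([] ++ arrayA)).getD x 0)) PySem.Dict.empty).items
        = pvDm arrayA arrayA := by
      rw [PySem.Dict.items_foldl_insert_fresh _ (fun a => a)
        (fun a => (PySem.Dict.counter ([] ++ arrayA)).getD a 0) _
        (fun a _ => PySem.Dict.contains_empty a) (by simpa using hsknd)]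
      show [] ++ _ = _
      simp only [List.nil_append, pvDm]
      apply List.map_congr_left
      intro a _
      rw [PySem.Dict.getD_counter]
    rw [hkeys, hitems]
  rw [hA, hB]
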